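-- pv_equiv track=rewrite | github.com/Hieu-L/flipflop | program.py | ds_st
-- ===== SOURCE A (Python) =====
-- from itertools import combinations
--
-- def conflict_free(argset,atks) :
--     """
--     Return True or False \n
--     argset : a list of arguments | ex : [ 'A' , 'B' ] \n
--     atks : a list of tuples of arguments, representing attacks | ex: [ ('Atk1','Def1') , ('Atk2','Def2') ] \n\n
--     checks if 'argset' is conflict free.
--     """
--
--     for s in argset :
--         for a,d in atks :
--             # if 's' attacks an argument within the set
--             if (s==a) and (d in argset) :
--                 return False
--
--     return True
--
-- def sublists(lst):
--     """
--     [ Return a list of lists ] \n\n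
--     lst : a list \n\n
--     Returns all possible sublists of the one given in parameter (code from "https://www.w3resource.com/python-exercises/list/python-data-type-list-exercise-33.php")
--     """
--     subs = []  # Create an empty list 'subs' to store the sublists
--
--     # Iterate through the range of numbers from 0 to the length of 'my_list' + 1
--     for i in range(0, len(lst) + 1):
--         # Use the 'combinations' function to generate all combinations of 'my_list' of length 'i'
--         temp = [list(x) for x in combinations(lst, i)]
--
--         # Check if 'temp' contains any elements; if so, extend the 'subs' list with the generated sublists
--         if len(temp) > 0:
--             subs.extend(temp)
--
--     return subs  # Return the list of generated sublists
--
-- def ve_st(args, atks, s) :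
--     """
--     Return True or False \n\n
--     args : a list of all arguments | ex : [ 'A' , 'B' ] \n
--     atks : a list of tuples of arguments, representing attacks | ex: [ ('Atk1','Def1') , ('Atk2','Def2') ] \n
--     s : a subset of args \n\n
--     checks if 's' is a stable extension of F.
--     """
--     # is s conflict-free ?
--     if conflict_free(s, atks):
--         # list to sets (for difference operator)
--         setArgs = set(args)
--         setS = set(s)
--         diff = setArgs.difference(s)
--
--         # complement attack check
--         for a in diff:
--             complement = False
--             for b in setS:
--                 if (b,a) in atks:
--                     complement = True
--
--             # no complement attack found
--             if not complement:
--                 return False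
--         # there is a complement attack for each node in args - s
--         return True
--
--     return False
--
-- def ds_st(args, atks, s) :
--     """
--     [ Return True or False | and | print "YES"/"NO" ] \n\n
--     args : a list of all arguments | ex : [ 'A' , 'B' ] \n
--     atks : a list of tuples of arguments, representing attacks | ex: [ ('Atk1','Def1') , ('Atk2','Def2') ] \n
--     s : an argument within args \n\n
--     checks if s belongs to each stable extension of F.
--     """
--     subs = sublists(args)
--     arg = s[0]
--     for currExt in subs:
--         if ve_st(args, atks, currExt):
--             if arg not in currExt:
--                 return False
--     return True
-- ===== SOURCE B (Python) =====
-- def ds_st(args, atks, s):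
--     arg = s[0]
--     atkset = set(atks)
--
--     def conflicts(x, chosen):
--         return (x, x) in atkset or any(
--             (x, y) in atkset or (y, x) in atkset for y in chosen)
--
--     def bad(rem, chosen):
--         # True iff some stable extension of the form chosen + (sublist of rem)
--         # omits arg; chosen is conflict-free by construction.
--         if not rem:
--             if arg in chosen:
--                 return False
--             return all(x in chosen or any((y, x) in atkset for y in chosen)
--                        for x in args)
--         head, rest = rem[0], rem[1:]
--         if bad(rest, chosen):
--             return True
--         if not conflicts(head, chosen):
--             return bad(rest, chosen + [head])
--         return False
--
--     return not bad(args, [])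
-- ===== Notes on version B (the rewrite author's own statement) =====
-- stated objective: alternative
-- what changed: B replaces A's generate-all-subsets-then-test loop by a recursive backtracking search that decides each argument in or out, prunes any branch as soon as the partial set has a conflict (so conflict-freeness is maintained incrementally instead of rechecked per subset), and stops at the first stable extension omitting arg.
import Mathlib
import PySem

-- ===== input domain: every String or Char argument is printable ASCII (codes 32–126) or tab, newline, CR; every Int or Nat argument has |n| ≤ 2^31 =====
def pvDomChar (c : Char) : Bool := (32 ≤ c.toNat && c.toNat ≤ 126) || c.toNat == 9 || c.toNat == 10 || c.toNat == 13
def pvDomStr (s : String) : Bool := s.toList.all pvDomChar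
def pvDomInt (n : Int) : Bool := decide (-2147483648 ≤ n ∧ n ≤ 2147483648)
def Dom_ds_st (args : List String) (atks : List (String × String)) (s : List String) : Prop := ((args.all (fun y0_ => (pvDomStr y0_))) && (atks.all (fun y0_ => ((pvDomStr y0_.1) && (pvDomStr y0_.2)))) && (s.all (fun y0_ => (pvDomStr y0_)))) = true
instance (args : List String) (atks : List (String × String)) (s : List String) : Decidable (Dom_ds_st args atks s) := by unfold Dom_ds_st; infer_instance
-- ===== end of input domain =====

-- B replaces A's generate-all-subsets-then-test loop by a recursive backtracking search with
-- incremental conflict pruning; equal return value, A raises IndexError on empty s (excluded by Pre_).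

-- ===== PORT A =====
def conflict_free (argset : List String) (atks : List (String × String)) : Bool :=
  -- 'for s in argset: for a,d in atks: if s==a and d in argset: return False // return True'
  argset.all (fun sA => atks.all (fun ad => !(sA == ad.1 && argset.contains ad.2)))

def sublists (lst : List String) : List (List String) :=
  -- 'for i in range(0, len(lst)+1): temp = combinations(lst, i); if len(temp) > 0: subs.extend(temp)'
  (List.range (lst.length + 1)).foldl
    (fun subs i =>
      let temp := PySem.List.combinations lst i
      if temp.length > 0 then subs ++ temp else subs) []

def ve_st (args : List String) (atks : List (String × String)) (s : List String) : Bool :=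
  if conflict_free s atks then
    let setArgs : PySem.Set String := PySem.Set.ofList args
    let setS : PySem.Set String := PySem.Set.ofList s
    let diff : PySem.Set String := PySem.Set.diff setArgs s
    -- 'for a in diff: complement = False; for b in setS: if (b,a) in atks: complement = True; if not complement: return False // return True'
    diff.all (fun a =>
      setS.foldl (fun complement b => if atks.contains (b, a) then true else complement) false)
  else false

def ds_st (args : List String) (atks : List (String × String)) (s : List String) : Bool :=
  let subs := sublists args
  match PySem.List.pyGet? s 0 with
  | none => false   -- 's[0]' raises IndexError on empty s; excluded by Pre_ds_st
  | some arg =>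
    -- 'for currExt in subs: if ve_st(...): if arg not in currExt: return False // return True'
    subs.all (fun currExt => if ve_st args atks currExt then currExt.contains arg else true)

-- ===== PORT B =====
-- '(x, x) in atkset or any((x, y) in atkset or (y, x) in atkset for y in chosen)'
def pvConflicts (atkset : PySem.Set (String × String)) (x : String) (chosen : List String) : Bool :=
  atkset.contains (x, x) || chosen.any (fun y => atkset.contains (x, y) || atkset.contains (y, x))

-- the recursive 'bad(rem, chosen)' of Source B, step for step
def pvBad (args : List String) (atkset : PySem.Set (String × String)) (arg : String) :
    List String → List String → Bool
  | [], chosen =>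
      if chosen.contains arg then false
      else args.all (fun x => chosen.contains x || chosen.any (fun y => atkset.contains (y, x)))
  | head :: rest, chosen =>
      if pvBad args atkset arg rest chosen then true
      else if !pvConflicts atkset head chosen then pvBad args atkset arg rest (chosen ++ [head])
      else false

def ds_st_alt (args : List String) (atks : List (String × String)) (s : List String) : Bool :=
  match PySem.List.pyGet? s 0 with
  | none => false   -- 's[0]' raises IndexError on empty s; excluded by Pre_ds_st
  | some arg =>
    let atkset : PySem.Set (String × String) := PySem.Set.ofList atks
    !(pvBad args atkset arg args [])

-- ===== PRECONDITION & SPEC =====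
-- Pre_ excludes only the empty s, on which A's 's[0]' raises IndexError.
def Pre_ds_st (args : List String) (atks : List (String × String)) (s : List String) : Prop := s ≠ []
instance (args : List String) (atks : List (String × String)) (s : List String) : Decidable (Pre_ds_st args atks s) := by unfold Pre_ds_st; infer_instance

def pvWitness_ds_st : List String × (List (String × String)) × List String :=
  (["a", "b"], [("a", "b")], ["a"])

def Spec_ds_st (args : List String) (atks : List (String × String)) (s : List String) (out : Bool) : Prop := out = ds_st_alt args atks s
instance (args : List String) (atks : List (String × String)) (s : List String) (out : Bool) : Decidable (Spec_ds_st args atks s out) := by unfold Spec_ds_st; infer_instance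

-- ===== CLAIM (what is proved, stated in full; the proofs are below) =====
def Claim_equal_ds_st : Prop := ∀ (args : List String) (atks : List (String × String)) (s : List String), Dom_ds_st args atks s → Pre_ds_st args atks s → Spec_ds_st args atks s (ds_st args atks s)

-- ===== LEMMAS AND PROOFS =====

-- the (order-free) stability property both programs decide for a candidate list t
def pvStableP (args : List String) (atks : List (String × String)) (t : List String) : Prop :=
  (¬ ∃ p ∈ atks, p.1 ∈ t ∧ p.2 ∈ t) ∧ (∀ x ∈ args, x ∈ t ∨ ∃ p ∈ atks, p.1 ∈ t ∧ p.2 = x)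

-- conflict-freeness alone (the invariant of B's backtracking)
def pvCF (atks : List (String × String)) (t : List String) : Prop :=
  ¬ ∃ p ∈ atks, p.1 ∈ t ∧ p.2 ∈ t

theorem conflict_free_iff (t : List String) (atks : List (String × String)) :
    conflict_free t atks = true ↔ ¬ ∃ p ∈ atks, p.1 ∈ t ∧ p.2 ∈ t := by
  simp only [conflict_free, List.all_eq_true, Bool.not_eq_eq_eq_not, Bool.not_true,
    Bool.and_eq_false_iff, beq_eq_false_iff_ne, ne_eq, List.contains_eq_mem, decide_eq_false_iff_not]
  constructor
  · rintro h ⟨p, hp, h1, h2⟩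
    rcases h p.1 h1 p hp with h' | h'
    · exact h' rfl
    · exact h' h2
  · intro h sA hsA ad had
    by_cases he : sA = ad.1
    · subst he
      right; intro hd; exact h ⟨ad, had, hsA, hd⟩
    · left; exact he

theorem ve_st_iff (args : List String) (atks : List (String × String)) (t : List String) :
    ve_st args atks t = true ↔ pvStableP args atks t := by
  unfold ve_st pvStableP
  by_cases hcf : conflict_free t atks
  · rw [if_pos hcf]
    rw [conflict_free_iff] at hcf
    rw [and_iff_right hcf]
    simp only [List.all_eq_true]
    have hfold : ∀ a : String, (PySem.Set.ofList t).foldl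
        (fun complement b => if atks.contains (b, a) then true else complement) false
        = ((false : Bool) || (PySem.Set.ofList t).any (fun b => atks.contains (b, a))) :=
      fun a => PySem.List.foldl_if_true_eq _ _ _
    constructor
    · intro h x hx
      by_cases hxt : x ∈ t
      · exact Or.inl hxt
      · right
        have := h x (by
          simp [PySem.Set.diff, List.mem_filter, PySem.Set.mem_ofList, PySem.Set.contains, hx, hxt])
        rw [hfold] at this
        simp only [Bool.false_or, List.any_eq_true, List.contains_eq_mem, decide_eq_true_eq] at this
        obtain ⟨b, hb, hmem⟩ := this
        exact ⟨(b, x), hmem, (PySem.Set.mem_ofList t b).mp hb, rfl⟩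
    · intro h a ha
      simp only [PySem.Set.diff, List.mem_filter, PySem.Set.mem_ofList, PySem.Set.contains,
        List.contains_eq_mem, Bool.not_eq_eq_eq_not, Bool.not_true, decide_eq_false_iff_not] at ha
      rcases h a ha.1 with hat | ⟨p, hp, h1, h2⟩
      · exact absurd hat ha.2
      · rw [hfold]
        simp only [Bool.false_or, List.any_eq_true, List.contains_eq_mem, decide_eq_true_eq]
        exact ⟨p.1, (PySem.Set.mem_ofList t p.1).mpr h1, by rwa [← h2, Prod.mk.eta]⟩
  · rw [if_neg hcf]
    rw [conflict_free_iff] at hcf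
    simp only [Bool.false_eq_true, false_iff, not_and]
    intro h; exact absurd h (by simpa using hcf)

theorem veA_iff (args : List String) (atks : List (String × String)) (t : List String) (arg : String) :
    ((if ve_st args atks t then t.contains arg else true) = true) ↔ (pvStableP args atks t → arg ∈ t) := by
  by_cases h : ve_st args atks t
  · have hst := (ve_st_iff args atks t).mp h
    simp [h, List.contains_eq_mem, hst]
  · have hst := (ve_st_iff args atks t).not.mp h
    simp [h, hst]

theorem mem_sublists_iff (lst : List String) (t : List String) :
    t ∈ sublists lst ↔ t.Sublist lst := by
  have hfold : sublists lst
      = (List.range (lst.length + 1)).foldl (fun subs i => subs ++ PySem.List.combinations lst i) [] := by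
    unfold sublists
    apply PySem.List.foldl_congr_mem
    intro acc i _
    dsimp only
    by_cases h : (PySem.List.combinations lst i).length > 0
    · simp [h]
    · simp only [gt_iff_lt, Nat.pos_iff_ne_zero, ne_eq, not_not] at h
      simp [List.length_eq_zero_iff.mp h]
  rw [hfold, PySem.List.foldl_append_eq_flatMap]
  simp only [List.nil_append, List.mem_flatMap, List.mem_range, PySem.List.mem_combinations_iff]
  constructor
  · rintro ⟨i, _, hs, _⟩; exact hs
  · intro hs; exact ⟨t.length, by have := hs.length_le; omega, hs, rfl⟩

theorem pvConflicts_false_iff (atks : List (String × String)) (x : String) (chosen : List String) :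
    pvConflicts (PySem.Set.ofList atks) x chosen = false ↔
      (x, x) ∉ atks ∧ ∀ y ∈ chosen, (x, y) ∉ atks ∧ (y, x) ∉ atks := by
  simp [pvConflicts, PySem.Set.contains, List.contains_eq_mem, PySem.Set.mem_ofList,
    List.any_eq_false, not_or]

theorem pvCF_snoc (atks : List (String × String)) (chosen : List String) (x : String)
    (hcf : pvCF atks chosen)
    (hx : pvConflicts (PySem.Set.ofList atks) x chosen = false) :
    pvCF atks (chosen ++ [x]) := by
  rw [pvConflicts_false_iff] at hx
  rintro ⟨⟨a, b⟩, hp, h1, h2⟩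
  simp only [List.mem_append, List.mem_singleton] at h1 h2
  rcases h1 with h1 | h1 <;> rcases h2 with h2 | h2
  · exact hcf ⟨(a, b), hp, h1, h2⟩
  · subst h2; exact (hx.2 a h1).2 hp
  · subst h1; exact (hx.2 b h2).1 hp
  · subst h1; subst h2; exact hx.1 hp

theorem pvConflicts_false_of_CF (atks : List (String × String)) (x : String)
    (chosen t : List String) (hcf : pvCF atks (chosen ++ x :: t)) :
    pvConflicts (PySem.Set.ofList atks) x chosen = false := by
  rw [pvConflicts_false_iff]
  have hxmem : x ∈ chosen ++ x :: t := by simp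
  refine ⟨fun h => hcf ⟨(x, x), h, hxmem, hxmem⟩, fun y hy => ?_⟩
  have hymem : y ∈ chosen ++ x :: t := by simp [hy]
  exact ⟨fun h => hcf ⟨(x, y), h, hxmem, hymem⟩, fun h => hcf ⟨(y, x), h, hymem, hxmem⟩⟩

-- B's search finds a bad extension iff one of the form chosen ++ (sublist of rem) exists
theorem pvBad_iff (args : List String) (atks : List (String × String)) (arg : String)
    (rem chosen : List String) (hcf : pvCF atks chosen) :
    pvBad args (PySem.Set.ofList atks) arg rem chosen = true ↔
      ∃ t, t.Sublist rem ∧ pvStableP args atks (chosen ++ t) ∧ arg ∉ chosen ++ t := by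
  induction rem generalizing chosen with
  | nil =>
    simp only [pvBad]
    by_cases ha : chosen.contains arg = true
    · simp only [ha, if_true, Bool.false_eq_true, false_iff]
      rintro ⟨t, ht, _, harg⟩
      rw [List.sublist_nil] at ht; subst ht
      exact harg (by simp [show arg ∈ chosen by simpa [List.contains_eq_mem] using ha])
    · have harg' : arg ∉ chosen := by simpa [List.contains_eq_mem] using ha
      rw [if_neg ha]
      constructor
      · intro h
        refine ⟨[], List.Sublist.refl _, ?_⟩
        rw [List.append_nil]
        refine ⟨⟨hcf, fun x hx => ?_⟩, harg'⟩
        have := List.all_eq_true.mp h x hx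
        simp only [Bool.or_eq_true, List.contains_eq_mem, decide_eq_true_eq,
          List.any_eq_true, PySem.Set.contains, PySem.Set.mem_ofList] at this
        rcases this with h' | ⟨y, hy, hmem⟩
        · exact Or.inl h'
        · exact Or.inr ⟨(y, x), by simpa [List.contains_eq_mem, PySem.Set.mem_ofList] using hmem, hy, rfl⟩
      · rintro ⟨t, ht, hst, _⟩
        rw [List.sublist_nil] at ht; subst ht
        rw [List.append_nil] at hst
        rw [List.all_eq_true]
        intro x hx
        rcases hst.2 x hx with h | ⟨p, hp, h1, h2⟩
        · simp [List.contains_eq_mem, h]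
        · simp only [Bool.or_eq_true, List.any_eq_true]
          refine Or.inr ⟨p.1, h1, ?_⟩
          simp only [PySem.Set.contains, List.contains_eq_mem, decide_eq_true_eq,
            PySem.Set.mem_ofList]
          rwa [← h2, Prod.mk.eta]
  | cons head rest ih =>
    simp only [pvBad]
    by_cases hb : pvBad args (PySem.Set.ofList atks) arg rest chosen = true
    · rw [if_pos hb]
      obtain ⟨t, hs, hrest⟩ := (ih chosen hcf).mp hb
      exact ⟨fun _ => ⟨t, hs.cons head, hrest⟩, fun _ => rfl⟩
    · rw [if_neg hb]
      by_cases hc : pvConflicts (PySem.Set.ofList atks) head chosen = false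
      · rw [if_pos (by simp [hc])]
        rw [ih (chosen ++ [head]) (pvCF_snoc atks chosen head hcf hc)]
        constructor
        · rintro ⟨t', hs, hst, harg⟩
          exact ⟨head :: t', hs.cons₂ head, by simpa using hst, by simpa using harg⟩
        · rintro ⟨t, hs, hst, harg⟩
          rcases List.sublist_cons_iff.mp hs with hs' | ⟨r, rfl, hr⟩
          · exact absurd ((ih chosen hcf).mpr ⟨t, hs', hst, harg⟩) hb
          · exact ⟨r, hr, by simpa using hst, by simpa using harg⟩
      · rw [if_neg (by simpa using hc)]
        simp only [Bool.false_eq_true, false_iff]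
        rintro ⟨t, hs, hst, harg⟩
        rcases List.sublist_cons_iff.mp hs with hs' | ⟨r, rfl, hr⟩
        · exact absurd ((ih chosen hcf).mpr ⟨t, hs', hst, harg⟩) hb
        · exact hc (pvConflicts_false_of_CF atks head chosen r hst.1)

-- ===== VERDICT (by name: the statement is the Claim_ definition above) =====
theorem ds_st_spec : Claim_equal_ds_st := by
  intro args atks s _ hpre
  unfold Spec_ds_st
  obtain ⟨a0, s', rfl⟩ : ∃ a0 s', s = a0 :: s' := by
    cases s with
    | nil => exact absurd rfl hpre
    | cons a t => exact ⟨a, t, rfl⟩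
  have hget : PySem.List.pyGet? (a0 :: s') 0 = some a0 := by
    simp [PySem.List.pyGet?, PySem.List.pyIdx?]
  rw [Bool.eq_iff_iff]
  simp only [ds_st, ds_st_alt, hget, List.all_eq_true, Bool.not_eq_eq_eq_not,
    Bool.not_true]
  simp only [Bool.eq_false_iff, ne_eq,
    pvBad_iff args atks a0 args [] (by rintro ⟨p, _, h, _⟩; simp at h)]
  constructor
  · rintro h ⟨t, hs, hst, harg⟩
    simp only [List.nil_append] at hst harg
    exact harg (by
      have := h t ((mem_sublists_iff args t).mpr hs)
      exact (veA_iff args atks t a0).mp this hst)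
  · intro h t ht
    rw [veA_iff]
    intro hst
    by_contra harg
    exact h ⟨t, (mem_sublists_iff args t).mp ht, by simpa using hst, by simpa using harg⟩
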